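-- pv_equiv track=rewrite | github.com/hamfreebird/freebird-music-player | freepygame/freetransformation.py | map_to_rgba
-- ===== SOURCE A (Python) =====
-- def map_to_rgba(part):
--     """
--     Extracts red, green, blue, and alpha values from a 2D list of pixel data.
--
--     Parameters:
--     part (list): A 2D list where each element is a list containing RGB or RGBA values.
--
--     Returns:
--     tuple: A tuple containing four lists, each representing the red, green, blue, and alpha values respectively.
--
--     Raises:
--     IndexError: If the input list is not a 2D list or if the inner lists do not contain at least 3 elements.
--     """
--     r, g, b, a = [], [], [], []
--     for x in range(0, len(part) - 1):
--         for y in range(0, len(part) - 1):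
--             r.append(part[x][y][0])
--             g.append(part[x][y][1])
--             b.append(part[x][y][2])
--             if len(part[x][y]) == 4:
--                 a.append(part[x][y][3])
--     return r, g, b, a
-- ===== SOURCE B (Python) =====
-- def map_to_rgba(part):
--     n = len(part) - 1
--     pixels = [p for row in part[:n] for p in row[:n]]
--     cols = [list(c) for c in zip(*(p[:3] for p in pixels))]
--     r, g, b = cols if cols else ([], [], [])
--     a = [p[3] for p in pixels if len(p) == 4]
--     return r, g, b, a
-- ===== Notes on version B (the rewrite author's own statement) =====
-- stated objective: alternative
-- what changed: B slices the grid to the visited (n-1)x(n-1) block, flattens it, and obtains r,g,b in one shot by transposing the 3-prefixes of the pixels with zip(*...) instead of A's interleaved index loop appending to four accumulators; alpha is a separate filtered projection.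
import Mathlib
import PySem

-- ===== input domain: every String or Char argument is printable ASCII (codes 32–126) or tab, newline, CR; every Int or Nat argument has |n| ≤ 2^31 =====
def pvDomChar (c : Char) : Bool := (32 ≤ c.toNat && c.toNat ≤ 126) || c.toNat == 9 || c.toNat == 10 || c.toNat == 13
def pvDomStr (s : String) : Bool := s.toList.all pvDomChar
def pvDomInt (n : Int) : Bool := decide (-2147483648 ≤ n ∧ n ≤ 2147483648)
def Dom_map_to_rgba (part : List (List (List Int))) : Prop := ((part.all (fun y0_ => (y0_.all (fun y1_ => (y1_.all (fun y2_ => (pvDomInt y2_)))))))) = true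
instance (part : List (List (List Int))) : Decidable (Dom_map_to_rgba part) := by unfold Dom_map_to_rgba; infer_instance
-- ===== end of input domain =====

-- B slices the visited block, flattens it, and gets r,g,b by transposing the
-- 3-prefixes of the pixels (zip(*...)) instead of A's interleaved index loop
-- with four accumulators (objective: alternative; same asymptotic cost).

-- ===== PORT A =====
-- one loop-body step of A: append the three channels and conditionally alpha
def pvStepA (s : List Int × List Int × List Int × List Int) (p : List Int) :
    List Int × List Int × List Int × List Int :=
  (s.1 ++ [PySem.List.pyGetD p 0 0],
   s.2.1 ++ [PySem.List.pyGetD p 1 0],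
   s.2.2.1 ++ [PySem.List.pyGetD p 2 0],
   if p.length = 4 then s.2.2.2 ++ [PySem.List.pyGetD p 3 0] else s.2.2.2)

-- out-of-range indexing (where Python raises IndexError) is totalized with pyGetD
-- defaults; exactly those inputs are excluded by Pre_map_to_rgba.
def map_to_rgba (part : List (List (List Int))) : List Int × List Int × List Int × List Int :=
  (PySem.List.pyRange 0 ((part.length : Int) - 1) 1).foldl
    (fun s x =>
      (PySem.List.pyRange 0 ((part.length : Int) - 1) 1).foldl
        (fun s y => pvStepA s (PySem.List.pyGetD (PySem.List.pyGetD part x []) y []))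
        s)
    ([], [], [], [])

-- ===== PORT B =====
-- Python zip(*xss): number of tuples = minimum length (0 for zip of nothing)
def pvZipStar (xss : List (List Int)) : List (List Int) :=
  match xss with
  | [] => []
  | x :: rest =>
      let m := rest.foldl (fun m xs => min m xs.length) x.length
      (List.range m).map (fun i => (x :: rest).map (fun xs => xs.getD i 0))

def map_to_rgba_alt (part : List (List (List Int))) : List Int × List Int × List Int × List Int :=
  let n : Int := (part.length : Int) - 1
  let pixels : List (List Int) :=
    (PySem.List.slice part none (some n)).flatMap
      (fun row => PySem.List.slice row none (some n))
  let cols := pvZipStar (pixels.map (fun p => PySem.List.slice p none (some 3)))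
  let rgb : List Int × List Int × List Int :=
    match cols with
    | [r, g, b] => (r, g, b)
    -- Python: empty cols → ([], [], []); any other length raises ValueError on
    -- unpacking, which only happens outside Pre_map_to_rgba (some pixel shorter
    -- than 3); totalized with the same default there.
    | _ => ([], [], [])
  (rgb.1, rgb.2.1, rgb.2.2,
   (pixels.filter (fun p => p.length = 4)).map (fun p => PySem.List.pyGetD p 3 0))

-- ===== PRECONDITION & SPEC =====
-- Pre_ excludes exactly the inputs on which Python A raises IndexError: some visited
-- row is shorter than len(part)-1, or some visited pixel has fewer than 3 entries.
def Pre_map_to_rgba (part : List (List (List Int))) : Prop :=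
  ∀ row ∈ part.take (part.length - 1),
    part.length - 1 ≤ row.length ∧ ∀ p ∈ row.take (part.length - 1), 3 ≤ p.length
instance (part : List (List (List Int))) : Decidable (Pre_map_to_rgba part) := by
  unfold Pre_map_to_rgba; infer_instance

def pvWitness_map_to_rgba : List (List (List Int)) :=
  [[[1, 2, 3], [4, 5, 6, 7]], [[8, 9, 10, 11], [12, 13, 14]]]

def Spec_map_to_rgba (part : List (List (List Int))) (out : List Int × List Int × List Int × List Int) : Prop := out = map_to_rgba_alt part
instance (part : List (List (List Int))) (out : List Int × List Int × List Int × List Int) : Decidable (Spec_map_to_rgba part out) := by unfold Spec_map_to_rgba; infer_instance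

-- ===== CLAIM (what is proved, stated in full; the proofs are below) =====
def Claim_equal_map_to_rgba : Prop := ∀ (part : List (List (List Int))), Dom_map_to_rgba part → Pre_map_to_rgba part → Spec_map_to_rgba part (map_to_rgba part)

-- ===== LEMMAS AND PROOFS =====

-- folding A's step over any pixel list = the four channel projections, appended to the state
lemma foldl_pvStepA (L : List (List Int)) (s : List Int × List Int × List Int × List Int) :
    L.foldl pvStepA s =
      (s.1 ++ L.map (fun p => PySem.List.pyGetD p 0 0),
       s.2.1 ++ L.map (fun p => PySem.List.pyGetD p 1 0),
       s.2.2.1 ++ L.map (fun p => PySem.List.pyGetD p 2 0),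
       s.2.2.2 ++ (L.filter (fun p => p.length = 4)).map (fun p => PySem.List.pyGetD p 3 0)) := by
  induction L generalizing s with
  | nil => simp
  | cons p L ih =>
      simp only [List.foldl_cons, ih, List.map_cons, List.filter_cons]
      unfold pvStepA
      by_cases h : p.length = 4 <;> simp [h]

-- A's nested fold is the fold of pvStepA over the flattened visited pixels
lemma nested_foldl_eq (part : List (List (List Int))) (xs ys : List Int)
    (s : List Int × List Int × List Int × List Int) :
    xs.foldl
      (fun s x =>
        ys.foldl
          (fun s y => pvStepA s (PySem.List.pyGetD (PySem.List.pyGetD part x []) y []))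
          s)
      s
    = (xs.flatMap
        (fun x => ys.map
          (fun y => PySem.List.pyGetD (PySem.List.pyGetD part x []) y []))).foldl pvStepA s := by
  induction xs generalizing s with
  | nil => simp
  | cons x xs ih =>
      simp only [List.foldl_cons, List.flatMap_cons, List.foldl_append, List.foldl_map, ih]

-- an index loop over a prefix is a take
lemma mapGetD_take {α : Type} (xs : List α) (m : Nat) (hm : m ≤ xs.length) (d : α) :
    (PySem.List.pyRange 0 (m : Int) 1).map (fun j => PySem.List.pyGetD xs j d) = xs.take m := by
  rw [PySem.List.pyRange_one]
  simp only [sub_zero, Int.toNat_natCast, List.map_map]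
  apply List.ext_getElem
  · simp [hm]
  · intro i h1 h2
    have hi : i < m := by simpa using h1
    simp [Function.comp, PySem.List.pyGetD_natCast, List.getD,
      List.getElem?_eq_getElem (lt_of_lt_of_le hi hm)]

-- under Pre_, A's visited pixel list equals B's slice-based flattened list
lemma pixels_eq (part : List (List (List Int))) (hpre : Pre_map_to_rgba part) :
    ((PySem.List.pyRange 0 ((part.length : Int) - 1) 1).flatMap
      (fun x => (PySem.List.pyRange 0 ((part.length : Int) - 1) 1).map
        (fun y => PySem.List.pyGetD (PySem.List.pyGetD part x []) y [])))
    = (PySem.List.slice part none (some ((part.length : Int) - 1))).flatMap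
        (fun row => PySem.List.slice row none (some ((part.length : Int) - 1))) := by
  cases part with
  | nil => simp [PySem.List.pyRange_one_eq_nil, PySem.List.slice]
  | cons p0 ps =>
      set m : Nat := (p0 :: ps).length - 1 with hm
      have hcast : ((p0 :: ps).length : Int) - 1 = (m : Int) := by
        simp only [hm, List.length_cons]; push_cast; omega
      rw [hcast, PySem.List.slice_to_natCast,
        ← mapGetD_take (p0 :: ps) m (by omega) [], List.flatMap_map]
      apply List.flatMap_congr
      intro x hx
      have hrow : PySem.List.pyGetD (p0 :: ps) x [] ∈ (p0 :: ps).take m := by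
        rw [← mapGetD_take (p0 :: ps) m (by omega) []]
        exact List.mem_map.mpr ⟨x, hx, rfl⟩
      have hr := hpre _ (by simpa [hm] using hrow)
      rw [PySem.List.slice_to_natCast, mapGetD_take _ m (by omega) []]

-- each channel column of the transposed 3-prefixes is a projection pass
lemma proj_eq (L : List (List Int)) (h : ∀ p ∈ L, 3 ≤ p.length) (i : Nat) (hi : i < 3) :
    (L.map (fun p => PySem.List.slice p none (some 3))).map (fun xs => xs.getD i 0)
      = L.map (fun p => PySem.List.pyGetD p (i : Int) 0) := by
  rw [List.map_map]
  apply List.map_congr_left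
  intro p hp
  have h3 := h p hp
  have hlt : i < p.length := by omega
  simp only [Function.comp_apply]
  have hc : (3 : Int) = ((3 : Nat) : Int) := rfl
  rw [hc, PySem.List.slice_to_natCast, PySem.List.pyGetD_natCast]
  simp [List.getD, List.getElem?_take, hi, List.getElem?_eq_getElem hlt]

-- the running minimum of zip(*) stays 3 over 3-prefixes of pixels of length ≥ 3
lemma foldl_min3 (ps : List (List Int)) (h : ∀ q ∈ ps, 3 ≤ q.length) :
    (ps.map (fun q => PySem.List.slice q none (some 3))).foldl
      (fun m xs => min m xs.length) 3 = 3 := by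
  induction ps with
  | nil => rfl
  | cons q ps ih =>
      have hq := h q (by simp)
      have hlen : (PySem.List.slice q none (some 3)).length = 3 := by
        have hc : (3 : Int) = ((3 : Nat) : Int) := rfl
        rw [hc, PySem.List.slice_to_natCast]
        simp; omega
      simp only [List.map_cons, List.foldl_cons, hlen]
      have : min 3 3 = 3 := rfl
      rw [this, ih (fun r hr => h r (by simp [hr]))]

-- zip(*(p[:3])) over nonempty pixels of length ≥ 3 yields the three channel columns
lemma zipStar_eq (L : List (List Int)) (hL : ∀ p ∈ L, 3 ≤ p.length) :
    pvZipStar (L.map (fun p => PySem.List.slice p none (some 3))) =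
      if L = [] then []
      else [L.map (fun p => PySem.List.pyGetD p 0 0),
            L.map (fun p => PySem.List.pyGetD p 1 0),
            L.map (fun p => PySem.List.pyGetD p 2 0)] := by
  cases L with
  | nil => simp [pvZipStar]
  | cons p ps =>
      have hp := hL p (by simp)
      have hlen : (PySem.List.slice p none (some 3)).length = 3 := by
        have hc : (3 : Int) = ((3 : Nat) : Int) := rfl
        rw [hc, PySem.List.slice_to_natCast]
        simp; omega
      simp only [List.map_cons, pvZipStar, hlen,
        foldl_min3 ps (fun q hq => hL q (by simp [hq]))]
      have hrange : List.range 3 = [0, 1, 2] := rfl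
      rw [hrange]
      have h0 := proj_eq (p :: ps) hL 0 (by norm_num)
      have h1 := proj_eq (p :: ps) hL 1 (by norm_num)
      have h2 := proj_eq (p :: ps) hL 2 (by norm_num)
      simp only [List.map_cons] at h0 h1 h2
      simp only [List.map_cons, Nat.cast_ofNat, Nat.cast_one, Nat.cast_zero] at h0 h1 h2 ⊢
      rw [if_neg (by simp)]
      simp only [List.map_nil]
      rw [h0, h1, h2]

-- every pixel B visits satisfies Pre_'s length bound
lemma pixels_len (part : List (List (List Int))) (hpre : Pre_map_to_rgba part) :
    ∀ p ∈ (PySem.List.slice part none (some ((part.length : Int) - 1))).flatMap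
        (fun row => PySem.List.slice row none (some ((part.length : Int) - 1))),
      3 ≤ p.length := by
  intro p hp
  obtain ⟨row, hrow, hp2⟩ := List.mem_flatMap.mp hp
  cases part with
  | nil => simp [PySem.List.slice] at hrow
  | cons p0 ps =>
      set m : Nat := (p0 :: ps).length - 1 with hm
      have hcast : ((p0 :: ps).length : Int) - 1 = (m : Int) := by
        simp only [hm, List.length_cons]; push_cast; omega
      rw [hcast, PySem.List.slice_to_natCast] at hrow hp2
      exact (hpre row (by simpa [hm] using hrow)).2 p (by simpa [hm] using hp2)

-- ===== VERDICT (by name: the statement is the Claim_ definition above) =====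
theorem map_to_rgba_spec : Claim_equal_map_to_rgba := by
  intro part _ hpre
  unfold Spec_map_to_rgba map_to_rgba map_to_rgba_alt
  rw [nested_foldl_eq, foldl_pvStepA, pixels_eq part hpre]
  simp only [List.nil_append]
  rw [zipStar_eq _ (pixels_len part hpre)]
  by_cases hnil :
      (PySem.List.slice part none (some ((part.length : Int) - 1))).flatMap
        (fun row => PySem.List.slice row none (some ((part.length : Int) - 1))) = [] <;>
    simp [hnil]
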